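-- pv_equiv track=rewrite | github.com/grawler5/reaperRM | Scripts/make_rm_fx.py | ensure_init_vars
-- ===== SOURCE A (Python) =====
-- def ensure_init_vars(text: str, vars_lines: str) -> str:
--     # Put right after @init line
--     lines = text.splitlines()
--     out = []
--     inserted = False
--     for i, ln in enumerate(lines):
--         out.append(ln)
--         if (not inserted) and ln.strip().startswith('@init'):
--             out.append(vars_lines.rstrip('\n'))
--             inserted = True
--     return '\n'.join(out) + '\n'
-- ===== SOURCE B (Python) =====
-- def ensure_init_vars(text: str, vars_lines: str) -> str:
--     # Locate-then-splice: find the first @init line, then splice the vars in.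
--     lines = text.splitlines()
--     idx = next((i for i, ln in enumerate(lines)
--                 if ln.strip().startswith('@init')), None)
--     if idx is not None:
--         lines = lines[:idx + 1] + [vars_lines.rstrip('\n')] + lines[idx + 1:]
--     return '\n'.join(lines) + '\n'
-- ===== Notes on version B (the rewrite author's own statement) =====
-- stated objective: simpler
-- what changed: The interleaved accumulate-with-inserted-flag loop is replaced by a locate-then-splice decomposition: compute the first @init line index with next/enumerate, then build the result by list slicing.
import Mathlib
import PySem

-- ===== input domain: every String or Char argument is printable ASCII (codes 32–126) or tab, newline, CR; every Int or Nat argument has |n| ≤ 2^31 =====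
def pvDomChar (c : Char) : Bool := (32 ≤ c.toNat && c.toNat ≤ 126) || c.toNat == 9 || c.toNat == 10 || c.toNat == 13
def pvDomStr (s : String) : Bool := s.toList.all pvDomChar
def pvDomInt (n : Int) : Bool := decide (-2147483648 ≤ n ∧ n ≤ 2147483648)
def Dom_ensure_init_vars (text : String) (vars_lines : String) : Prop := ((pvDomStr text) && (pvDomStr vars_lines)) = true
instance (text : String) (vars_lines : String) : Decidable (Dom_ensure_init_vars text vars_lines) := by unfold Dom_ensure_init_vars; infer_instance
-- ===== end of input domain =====

-- B replaces A's accumulate-with-flag loop by a locate-then-splice decomposition (objective: simpler).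

-- shared primitives (both Pythons call the same builtins)
-- hand port of Python's str.rstrip('\n'): drop trailing '\n' characters — exact
def pvRstripNl (s : List Char) : List Char :=
  (s.reverse.dropWhile (· == '\n')).reverse

def pvIsInit (ln : List Char) : Bool :=
  PySem.Chars.startswith (PySem.Chars.strip ln) "@init".toList

-- ===== PORT A =====
def ensure_init_vars (text : String) (vars_lines : String) : String :=
  let lines := PySem.Chars.splitlines text.toList
  let st := lines.foldl
    (fun (st : List (List Char) × Bool) ln =>
      let out := st.1 ++ [ln]
      if (!st.2) && pvIsInit ln then (out ++ [pvRstripNl vars_lines.toList], true)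
      else (out, st.2))
    ([], false)
  String.ofList (PySem.Chars.join ['\n'] st.1 ++ ['\n'])

-- ===== PORT B =====
def ensure_init_vars_alt (text : String) (vars_lines : String) : String :=
  let lines := PySem.Chars.splitlines text.toList
  let idx? := ((PySem.List.enumerate lines 0).find? (fun p => pvIsInit p.2)).map (·.1)
  let res := match idx? with
    | some i => PySem.List.slice lines none (some (i + 1)) ++ [pvRstripNl vars_lines.toList]
                  ++ PySem.List.slice lines (some (i + 1)) none
    | none => lines
  String.ofList (PySem.Chars.join ['\n'] res ++ ['\n'])

-- ===== PRECONDITION & SPEC =====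
def Spec_ensure_init_vars (text : String) (vars_lines : String) (out : String) : Prop := out = ensure_init_vars_alt text vars_lines
instance (text : String) (vars_lines : String) (out : String) : Decidable (Spec_ensure_init_vars text vars_lines out) := by unfold Spec_ensure_init_vars; infer_instance

-- ===== CLAIM (what is proved, stated in full; the proofs are below) =====
def Claim_equal_ensure_init_vars : Prop := ∀ (text : String) (vars_lines : String), Dom_ensure_init_vars text vars_lines → Spec_ensure_init_vars text vars_lines (ensure_init_vars text vars_lines)

-- ===== LEMMAS AND PROOFS =====

-- A's loop body, with the inserted value fixed
def pvStep (v : List Char) (st : List (List Char) × Bool) (ln : List Char) :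
    List (List Char) × Bool :=
  let out := st.1 ++ [ln]
  if (!st.2) && pvIsInit ln then (out ++ [v], true) else (out, st.2)

-- what B builds, phrased via findIdx?
def pvSplice (v : List Char) (lines : List (List Char)) : List (List Char) :=
  match lines.findIdx? pvIsInit with
  | some i => lines.take (i + 1) ++ [v] ++ lines.drop (i + 1)
  | none => lines

theorem foldl_pvStep_true (v : List Char) :
    ∀ (lines acc : List (List Char)),
      lines.foldl (pvStep v) (acc, true) = (acc ++ lines, true) := by
  intro lines
  induction lines with
  | nil => intro acc; simp
  | cons ln rest ih =>
      intro acc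
      have hstep : pvStep v (acc, true) ln = (acc ++ [ln], true) := by
        simp [pvStep]
      rw [List.foldl_cons, hstep, ih]
      simp

theorem foldl_pvStep_false (v : List Char) :
    ∀ (lines acc : List (List Char)),
      (lines.foldl (pvStep v) (acc, false)).1 = acc ++ pvSplice v lines := by
  intro lines
  induction lines with
  | nil => intro acc; simp [pvSplice]
  | cons ln rest ih =>
      intro acc
      by_cases h : pvIsInit ln = true
      · have hstep : pvStep v (acc, false) ln = (acc ++ [ln] ++ [v], true) := by
          simp [pvStep, h]
        rw [List.foldl_cons, hstep, foldl_pvStep_true]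
        simp [pvSplice, List.findIdx?_cons, h]
      · have hstep : pvStep v (acc, false) ln = (acc ++ [ln], false) := by
          simp [pvStep, h]
        rw [List.foldl_cons, hstep, ih]
        simp only [pvSplice, List.findIdx?_cons, h, Bool.false_eq_true, if_false]
        cases hf : rest.findIdx? pvIsInit with
        | none => simp
        | some i => simp [List.take_succ_cons, List.drop_succ_cons]

theorem enumerate_find (lines : List (List Char)) :
    ∀ (s : Nat),
      (((PySem.List.enumerate lines (s : Int)).find? (fun p => pvIsInit p.2)).map (·.1)) =
        (lines.findIdx? pvIsInit).map (fun i => ((s + i : Nat) : Int)) := by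
  induction lines with
  | nil => intro s; simp [PySem.List.enumerate_nil]
  | cons ln rest ih =>
      intro s
      rw [PySem.List.enumerate_cons]
      by_cases h : pvIsInit ln = true
      · simp [h, List.findIdx?_cons]
      · simp only [List.find?_cons, h, Bool.false_eq_true, if_false, List.findIdx?_cons]
        have hc : ((s : Int) + 1) = ((s + 1 : Nat) : Int) := by push_cast; ring
        rw [hc, ih (s + 1)]
        cases hf : rest.findIdx? pvIsInit with
        | none => simp
        | some i =>
            simp only [Option.map_some]
            congr 1
            push_cast; ring

-- ===== VERDICT (by name: the statement is the Claim_ definition above) =====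
theorem ensure_init_vars_spec : Claim_equal_ensure_init_vars := by
  intro text vars_lines _
  unfold Spec_ensure_init_vars ensure_init_vars ensure_init_vars_alt
  show String.ofList (PySem.Chars.join ['\n']
      ((PySem.Chars.splitlines text.toList).foldl (pvStep (pvRstripNl vars_lines.toList))
        ([], false)).1 ++ ['\n']) = _
  set lines := PySem.Chars.splitlines text.toList with hl
  set v := pvRstripNl vars_lines.toList with hv
  rw [foldl_pvStep_false v lines []]
  have hB := enumerate_find lines 0
  simp only [Nat.cast_zero, Nat.zero_add] at hB
  simp only [hB]
  simp only [List.nil_append]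
  congr 2
  cases hf : lines.findIdx? pvIsInit with
  | none => simp [pvSplice, hf]
  | some i =>
      simp only [pvSplice, hf, Option.map_some]
      have h1 : ((i : Int) + 1) = ((i + 1 : Nat) : Int) := by push_cast; ring
      rw [h1, PySem.List.slice_to_natCast, PySem.List.slice_from_natCast]
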